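-- pv_equiv track=rewrite | github.com/sbtoonz/IDA-Helper-Scripts | xpmem_hunter.py | _norm_user_doslink
-- ===== SOURCE A (Python) =====
-- def _norm_user_doslink(s):
--     """
--     Map NT-style names to user-mode \\.\ links:
--       \DosDevices\Foo  -> \\.\Foo
--       \??\Foo          -> \\.\Foo
--       GLOBAL??\Foo     -> \\.\Foo
--     Return (user_path, nt_path) tuple where user_path may be None.
--     """
--     if not s: return (None, None)
--     sl = s.replace("\\\\", "\\").strip()
--     nt = sl
--     user = None
--     for pref in ["\\DosDevices\\", "\\??\\", "\\GLOBAL??\\", "\\GLOBAL??", "\\DosDevices"]: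
--         if sl.lower().startswith(pref.lower()):
--             tail = sl[len(pref):].lstrip("\\")
--             if tail:
--                 user = r"\\.\{}".format(tail)
--             break
--     return (user, nt)
-- ===== SOURCE B (Python) =====
-- import re
--
-- # One compiled, start-anchored, case-insensitive alternation of the five prefixes,
-- # in the same order A tries them (re.match picks the first alternative that matches).
-- _PREF_RE = re.compile(r"\\DosDevices\\|\\\?\?\\|\\GLOBAL\?\?\\|\\GLOBAL\?\?|\\DosDevices",
--                       re.IGNORECASE)
--
-- def _norm_user_doslink(s):
--     if not s:
--         return (None, None)
--     sl = s.replace("\\\\", "\\").strip()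
--     user = None
--     m = _PREF_RE.match(sl)
--     if m:
--         tail = sl[m.end():].lstrip("\\")
--         if tail:
--             user = "\\\\.\\" + tail
--     return (user, sl)
-- ===== Notes on version B (the rewrite author's own statement) =====
-- stated objective: idiomatic
-- what changed: The five-way prefix loop with per-iteration lower()/startswith is replaced by one compiled start-anchored case-insensitive regex alternation (same prefix order), matched once with re.match.
import Mathlib
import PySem

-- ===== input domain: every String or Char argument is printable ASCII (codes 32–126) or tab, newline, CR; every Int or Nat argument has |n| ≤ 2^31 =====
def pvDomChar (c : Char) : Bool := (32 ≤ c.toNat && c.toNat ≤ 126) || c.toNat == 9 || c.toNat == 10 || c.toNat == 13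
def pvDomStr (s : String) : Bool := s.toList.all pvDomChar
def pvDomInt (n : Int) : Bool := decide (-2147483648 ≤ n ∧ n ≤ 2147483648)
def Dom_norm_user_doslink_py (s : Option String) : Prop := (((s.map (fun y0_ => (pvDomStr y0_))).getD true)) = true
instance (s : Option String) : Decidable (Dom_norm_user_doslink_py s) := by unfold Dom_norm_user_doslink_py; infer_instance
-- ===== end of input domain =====

-- B replaces A's per-prefix loop by one anchored case-insensitive regex alternation (idiomatic); same return value everywhere.

-- ===== PORT A =====
-- the five prefixes, in A's order
def pvPrefs : List (List Char) :=
  ["\\DosDevices\\".toList, "\\??\\".toList, "\\GLOBAL??\\".toList, "\\GLOBAL??".toList, "\\DosDevices".toList]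

-- A's for-loop: on the first matching prefix compute tail and user, then break.
-- sl[len(pref):] with a nonnegative in-range start is List.drop; lstrip("\\") is dropWhile (== '\\') (exact for a one-char strip set).
def pvLoopA (sl : List Char) : List (List Char) → Option (List Char)
  | [] => none
  | p :: ps =>
      if PySem.Chars.startswith (PySem.Chars.lower sl) (PySem.Chars.lower p) then
        let tail := (sl.drop p.length).dropWhile (· == '\\')
        if tail = [] then none else some ("\\\\.\\".toList ++ tail)
      else pvLoopA sl ps

def norm_user_doslink_py (s : Option String) : Option String × Option String :=
  match s with
  | none => (none, none)
  | some str =>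
      if str = "" then (none, none)
      else
        let sl := PySem.Chars.strip (PySem.Chars.replace str.toList "\\\\".toList "\\".toList)
        let user := pvLoopA sl pvPrefs
        (user.map String.ofList, some (String.ofList sl))

-- ===== PORT B =====
-- B's compiled regex: a start-anchored, case-insensitive alternation of the same five prefixes;
-- re.match returns the end of the first alternative that matches, modeled exactly as findSome? of the prefix length.
def pvMatchEnd (sl : List Char) : Option Nat :=
  let low := PySem.Chars.lower sl
  pvPrefs.findSome? (fun p => if PySem.Chars.startswith low (PySem.Chars.lower p) then some p.length else none)

def norm_user_doslink_py_alt (s : Option String) : Option String × Option String :=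
  match s with
  | none => (none, none)
  | some str =>
      if str = "" then (none, none)
      else
        let sl := PySem.Chars.strip (PySem.Chars.replace str.toList "\\\\".toList "\\".toList)
        let user :=
          match pvMatchEnd sl with
          | none => none
          | some k =>
              let tail := (sl.drop k).dropWhile (· == '\\')
              if tail = [] then none else some ("\\\\.\\".toList ++ tail)
        (user.map String.ofList, some (String.ofList sl))

-- ===== PRECONDITION & SPEC =====
def Spec_norm_user_doslink_py (s : Option String) (out : Option String × Option String) : Prop := out = norm_user_doslink_py_alt s
instance (s : Option String) (out : Option String × Option String) : Decidable (Spec_norm_user_doslink_py s out) := by unfold Spec_norm_user_doslink_py; infer_instance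

-- ===== CLAIM (what is proved, stated in full; the proofs are below) =====
def Claim_equal_norm_user_doslink_py : Prop := ∀ (s : Option String), Dom_norm_user_doslink_py s → Spec_norm_user_doslink_py s (norm_user_doslink_py s)

-- ===== LEMMAS AND PROOFS =====
-- A's break-on-first-match loop computes exactly B's "first match end, then post-process".
theorem pvLoopA_eq_match (sl : List Char) (ps : List (List Char)) :
    pvLoopA sl ps =
      match ps.findSome? (fun p => if PySem.Chars.startswith (PySem.Chars.lower sl) (PySem.Chars.lower p) then some p.length else none) with
      | none => none
      | some k =>
          let tail := (sl.drop k).dropWhile (· == '\\')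
          if tail = [] then none else some ("\\\\.\\".toList ++ tail) := by
  induction ps with
  | nil => simp [pvLoopA]
  | cons p ps ih =>
      by_cases h : PySem.Chars.startswith (PySem.Chars.lower sl) (PySem.Chars.lower p) = true
      · simp [pvLoopA, List.findSome?, h]
      · simp only [Bool.not_eq_true] at h
        simp [pvLoopA, List.findSome?, h, ih]

-- ===== VERDICT (by name: the statement is the Claim_ definition above) =====
theorem norm_user_doslink_py_spec : Claim_equal_norm_user_doslink_py := by
  intro s _
  unfold Spec_norm_user_doslink_py norm_user_doslink_py norm_user_doslink_py_alt pvMatchEnd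
  cases s with
  | none => rfl
  | some str =>
      by_cases h : str = "" <;> simp only [if_pos, if_neg, h, pvLoopA_eq_match, reduceIte]
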